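-- pv_equiv track=rewrite | github.com/FedericoBustaffa/thesis | code/shared_memory/sm_tsp.py | merge_replace
-- ===== SOURCE A (Python) =====
-- def merge_replace(population, scores1, offsprings, scores2):
--
--     population, scores1 = (
--         list(t)
--         for t in zip(
--             *sorted(zip(population, scores1), key=lambda x: x[1], reverse=True)
--         )
--     )
--
--     offsprings, scores2 = (
--         list(t)
--         for t in zip(
--             *sorted(zip(offsprings, scores2), key=lambda x: x[1], reverse=True)
--         )
--     )
--
--     next_generation = []
--     next_gen_scores = []
--     index = 0
--     index1 = 0
--     index2 = 0
--
--     while (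
--         index < len(population)
--         and index1 < len(population)
--         and index2 < len(offsprings)
--     ):
--         if scores1[index1] > scores2[index2]:
--             next_generation.append(population[index1])
--             next_gen_scores.append(scores1[index1])
--             index1 += 1
--         else:
--             next_generation.append(offsprings[index2])
--             next_gen_scores.append(scores2[index2])
--             index2 += 1
--
--         index += 1
--
--     if index1 >= len(population):
--         return next_generation, next_gen_scores
--     elif index2 >= len(offsprings):
--         next_generation.extend(population[index1 : len(population) - index2])
--         next_gen_scores.extend(scores1[index1 : len(scores1) - index2])
--
--     return next_generation, next_gen_scores
-- ===== SOURCE B (Python) =====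
-- def merge_replace(population, scores1, offsprings, scores2):
--     pop_pairs = list(zip(population, scores1))
--     off_pairs = list(zip(offsprings, scores2))
--     top = sorted(off_pairs + pop_pairs, key=lambda p: p[1], reverse=True)[: len(pop_pairs)]
--     return [c for c, _ in top], [s for _, s in top]
-- ===== Notes on version B (the rewrite author's own statement) =====
-- stated objective: simpler
-- what changed: A's hand-written two-pointer merge loop with index bookkeeping and a tail-fill slice is replaced by one stable descending sort of the concatenated (offspring, population) score-pair lists followed by a top-n slice and unzip.
import Mathlib
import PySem

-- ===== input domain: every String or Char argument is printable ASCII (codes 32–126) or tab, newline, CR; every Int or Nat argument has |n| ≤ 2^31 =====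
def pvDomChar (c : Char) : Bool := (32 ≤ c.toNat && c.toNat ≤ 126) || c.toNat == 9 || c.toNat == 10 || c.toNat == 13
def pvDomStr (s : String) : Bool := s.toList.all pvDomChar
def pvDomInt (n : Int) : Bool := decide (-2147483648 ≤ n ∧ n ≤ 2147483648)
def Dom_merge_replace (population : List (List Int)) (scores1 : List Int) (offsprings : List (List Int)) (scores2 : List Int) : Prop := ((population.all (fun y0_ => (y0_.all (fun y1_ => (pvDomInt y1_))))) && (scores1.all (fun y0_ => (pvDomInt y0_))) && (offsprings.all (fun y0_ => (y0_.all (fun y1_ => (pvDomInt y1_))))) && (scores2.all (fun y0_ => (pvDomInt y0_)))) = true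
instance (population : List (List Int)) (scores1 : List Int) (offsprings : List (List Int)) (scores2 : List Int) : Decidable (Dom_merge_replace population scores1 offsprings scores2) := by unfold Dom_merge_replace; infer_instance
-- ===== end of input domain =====

-- B replaces A's hand-written two-pointer merge + tail-fill by one stable descending
-- sort of the concatenated (offspring, population) pair lists followed by a top-n slice
-- (objective: simpler; same asymptotic cost class, not claimed faster).

-- ===== PORT A =====
-- the while loop of A: state (next_generation, next_gen_scores, index, index1, index2);
-- index is only used by the guard, so the result carries (ng, ns, index1, index2)
def pvLoopA (population : List (List Int)) (scores1 : List Int)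
    (offsprings : List (List Int)) (scores2 : List Int)
    (next_generation : List (List Int)) (next_gen_scores : List Int)
    (index index1 index2 : Nat) : List (List Int) × List Int × Nat × Nat :=
  if index < population.length ∧ index1 < population.length ∧ index2 < offsprings.length then
    if PySem.List.pyGetD scores1 (index1 : Int) 0 > PySem.List.pyGetD scores2 (index2 : Int) 0 then
      pvLoopA population scores1 offsprings scores2
        (next_generation ++ [PySem.List.pyGetD population (index1 : Int) []])
        (next_gen_scores ++ [PySem.List.pyGetD scores1 (index1 : Int) 0])
        (index + 1) (index1 + 1) index2
    else
      pvLoopA population scores1 offsprings scores2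
        (next_generation ++ [PySem.List.pyGetD offsprings (index2 : Int) []])
        (next_gen_scores ++ [PySem.List.pyGetD scores2 (index2 : Int) 0])
        (index + 1) index1 (index2 + 1)
  else (next_generation, next_gen_scores, index1, index2)
termination_by population.length - index
decreasing_by all_goals omega

def merge_replace (population : List (List Int)) (scores1 : List Int) (offsprings : List (List Int)) (scores2 : List Int) : List (List Int) × List Int :=
  -- population, scores1 = (list(t) for t in zip(*sorted(zip(population, scores1), key=..., reverse=True)))
  let sp := PySem.List.sorted (population.zip scores1) (fun x => x.2) true
  let population := sp.map Prod.fst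
  let scores1 := sp.map Prod.snd
  let so := PySem.List.sorted (offsprings.zip scores2) (fun x => x.2) true
  let offsprings := so.map Prod.fst
  let scores2 := so.map Prod.snd
  match pvLoopA population scores1 offsprings scores2 [] [] 0 0 0 with
  | (next_generation, next_gen_scores, index1, index2) =>
    if index1 ≥ population.length then (next_generation, next_gen_scores)
    else if index2 ≥ offsprings.length then
      (next_generation ++ PySem.List.slice population (some (index1 : Int)) (some ((population.length : Int) - (index2 : Int))),
       next_gen_scores ++ PySem.List.slice scores1 (some (index1 : Int)) (some ((scores1.length : Int) - (index2 : Int))))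
    else (next_generation, next_gen_scores)

-- ===== PORT B =====
def merge_replace_alt (population : List (List Int)) (scores1 : List Int) (offsprings : List (List Int)) (scores2 : List Int) : List (List Int) × List Int :=
  let pop_pairs := population.zip scores1
  let off_pairs := offsprings.zip scores2
  let top := (PySem.List.sorted (off_pairs ++ pop_pairs) (fun p => p.2) true).take pop_pairs.length
  (top.map Prod.fst, top.map Prod.snd)

-- ===== PRECONDITION & SPEC =====
-- Pre_ excludes exactly the inputs where Python A raises ValueError: when either
-- zip(population, scores1) or zip(offsprings, scores2) is empty, the `x, y = zip(*sorted(...))`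
-- unpacking gets zero values ("not enough values to unpack").
def Pre_merge_replace (population : List (List Int)) (scores1 : List Int) (offsprings : List (List Int)) (scores2 : List Int) : Prop :=
  population ≠ [] ∧ scores1 ≠ [] ∧ offsprings ≠ [] ∧ scores2 ≠ []
instance (population : List (List Int)) (scores1 : List Int) (offsprings : List (List Int)) (scores2 : List Int) : Decidable (Pre_merge_replace population scores1 offsprings scores2) := by unfold Pre_merge_replace; infer_instance
def pvWitness_merge_replace : List (List Int) × List Int × List (List Int) × List Int :=
  ([[1]], [1], [[2]], [2])

def Spec_merge_replace (population : List (List Int)) (scores1 : List Int) (offsprings : List (List Int)) (scores2 : List Int) (out : List (List Int) × List Int) : Prop := out = merge_replace_alt population scores1 offsprings scores2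
instance (population : List (List Int)) (scores1 : List Int) (offsprings : List (List Int)) (scores2 : List Int) (out : List (List Int) × List Int) : Decidable (Spec_merge_replace population scores1 offsprings scores2 out) := by unfold Spec_merge_replace; infer_instance

-- ===== CLAIM (what is proved, stated in full; the proofs are below) =====
def Claim_equal_merge_replace : Prop := ∀ (population : List (List Int)) (scores1 : List Int) (offsprings : List (List Int)) (scores2 : List Int), Dom_merge_replace population scores1 offsprings scores2 → Pre_merge_replace population scores1 offsprings scores2 → Spec_merge_replace population scores1 offsprings scores2 (merge_replace population scores1 offsprings scores2)
-- ===== LEMMAS AND PROOFS =====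

-- the stable descending merge that both programs compute: take from the left (offspring)
-- side unless the right (population) head has a strictly larger score
def pvMerge : List (List Int × Int) → List (List Int × Int) → List (List Int × Int)
  | [], P => P
  | o :: O, [] => o :: O
  | o :: O, p :: P =>
      if p.2 > o.2 then p :: pvMerge (o :: O) P else o :: pvMerge O (p :: P)
termination_by A B => A.length + B.length

lemma pvMerge_nil_right (A : List (List Int × Int)) : pvMerge A [] = A := by
  cases A <;> simp [pvMerge]

lemma pvMerge_singleton (y : List Int × Int) (A : List (List Int × Int)) :
    pvMerge A [y] = PySem.List.insertBy (fun a b => decide (b.2 < a.2)) y A := by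
  induction A with
  | nil => simp [pvMerge, PySem.List.insertBy]
  | cons a A' ih =>
      by_cases h : y.2 > a.2 <;>
        simp [pvMerge, PySem.List.insertBy, h, ih]

lemma insert_pvMerge (y : List Int × Int) (A B : List (List Int × Int)) :
    PySem.List.insertBy (fun a b => decide (b.2 < a.2)) y (pvMerge A B)
      = pvMerge A (PySem.List.insertBy (fun a b => decide (b.2 < a.2)) y B) := by
  induction A generalizing B with
  | nil => simp [pvMerge]
  | cons a A' ihA =>
    induction B with
    | nil =>
        rw [pvMerge_nil_right]
        simp [PySem.List.insertBy, pvMerge_singleton]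
    | cons b B' ihB =>
      by_cases hby : b.2 < y.2
      · -- y is inserted at the front of b :: B'
        by_cases hba : b.2 > a.2
        · by_cases hya : y.2 > a.2
          · simp [pvMerge, PySem.List.insertBy, hby, hba, hya]
          · omega
        · by_cases hya : y.2 > a.2
          · simp [pvMerge, PySem.List.insertBy, hby, hba, hya]
          · have := ihA (b :: B')
            simp [pvMerge, PySem.List.insertBy, hby, hba, hya] at this ⊢
            rw [← this]
      · -- y goes after b
        by_cases hba : b.2 > a.2
        · have := ihB
          simp [pvMerge, PySem.List.insertBy, hby, hba] at this ⊢
          rw [this]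
        · have hya : ¬ a.2 < y.2 := by omega
          have := ihA (b :: B')
          simp [pvMerge, PySem.List.insertBy, hby, hba, hya] at this ⊢
          rw [← this]

lemma sorted_append_eq_pvMerge (xs ys : List (List Int × Int)) :
    PySem.List.sorted (xs ++ ys) (fun p => p.2) true
      = pvMerge (PySem.List.sorted xs (fun p => p.2) true)
                (PySem.List.sorted ys (fun p => p.2) true) := by
  induction ys using List.reverseRecOn with
  | nil =>
      rw [show PySem.List.sorted ([] : List (List Int × Int)) (fun p => p.2) true = [] from rfl,
        pvMerge_nil_right]
      simp
  | append_singleton ys y ih =>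
      rw [show xs ++ (ys ++ [y]) = (xs ++ ys) ++ [y] by simp,
        PySem.List.sorted_rev_eq_foldl_insertBy ((xs ++ ys) ++ [y]),
        PySem.List.sorted_rev_eq_foldl_insertBy (ys ++ [y]),
        List.foldl_concat, List.foldl_concat,
        ← PySem.List.sorted_rev_eq_foldl_insertBy (xs ++ ys),
        ← PySem.List.sorted_rev_eq_foldl_insertBy ys,
        ih, insert_pvMerge]

-- the loop + tail of A computes (accumulators ++) take (n - i1 - i2) of the merge of the
-- remaining suffixes; n = |P|, m = |O|
lemma loopA_spec (P O : List (List Int × Int)) :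
    ∀ (k i1 i2 : Nat) (ng : List (List Int)) (ns : List Int),
      i1 + i2 ≤ P.length → i2 ≤ O.length → k = P.length - i1 - i2 →
      (match pvLoopA (P.map Prod.fst) (P.map Prod.snd) (O.map Prod.fst) (O.map Prod.snd)
          ng ns (i1 + i2) i1 i2 with
       | (next_generation, next_gen_scores, index1, index2) =>
         if index1 ≥ (P.map Prod.fst).length then (next_generation, next_gen_scores)
         else if index2 ≥ (O.map Prod.fst).length then
           (next_generation ++ PySem.List.slice (P.map Prod.fst) (some (index1 : Int)) (some (((P.map Prod.fst).length : Int) - (index2 : Int))),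
            next_gen_scores ++ PySem.List.slice (P.map Prod.snd) (some (index1 : Int)) (some (((P.map Prod.snd).length : Int) - (index2 : Int))))
         else (next_generation, next_gen_scores))
      = (ng ++ ((pvMerge (O.drop i2) (P.drop i1)).take k).map Prod.fst,
         ns ++ ((pvMerge (O.drop i2) (P.drop i1)).take k).map Prod.snd) := by
  intro k
  induction k with
  | zero =>
      intro i1 i2 ng ns h1 h2 hk
      rw [pvLoopA]
      have hguard : ¬ ((i1 + i2) < (P.map Prod.fst).length ∧
          i1 < (P.map Prod.fst).length ∧ i2 < (O.map Prod.fst).length) := by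
        simp only [List.length_map]; omega
      rw [if_neg hguard]
      simp only [List.length_map]
      by_cases hi1 : i1 ≥ P.length
      · simp [hi1]
      · rw [if_neg hi1]
        by_cases hi2 : i2 ≥ O.length
        · rw [if_pos hi2]
          have hii : ((P.length : Int) - (i2 : Int)) = ((i1 : Nat) : Int) := by omega
          simp [hii, PySem.List.slice_natCast]
        · simp [hi2]
  | succ k ih =>
      intro i1 i2 ng ns h1 h2 hk
      have hi1 : i1 < P.length := by omega
      have hidx : i1 + i2 < P.length := by omega
      rw [pvLoopA]
      by_cases hi2 : i2 < O.length
      · rw [if_pos (by simp only [List.length_map]; exact ⟨hidx, by omega, hi2⟩)]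
        have hp : PySem.List.pyGetD (P.map Prod.snd) (i1 : Int) 0 = (P[i1]'hi1).2 := by
          rw [PySem.List.pyGetD_natCast]
          simp [List.getD_eq_getElem?_getD, List.getElem?_eq_getElem (by simpa using hi1)]
        have ho : PySem.List.pyGetD (O.map Prod.snd) (i2 : Int) 0 = (O[i2]'hi2).2 := by
          rw [PySem.List.pyGetD_natCast]
          simp [List.getD_eq_getElem?_getD, List.getElem?_eq_getElem (by simpa using hi2)]
        have hpf : PySem.List.pyGetD (P.map Prod.fst) (i1 : Int) [] = (P[i1]'hi1).1 := by
          rw [PySem.List.pyGetD_natCast]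
          simp [List.getD_eq_getElem?_getD, List.getElem?_eq_getElem (by simpa using hi1)]
        have hof : PySem.List.pyGetD (O.map Prod.fst) (i2 : Int) [] = (O[i2]'hi2).1 := by
          rw [PySem.List.pyGetD_natCast]
          simp [List.getD_eq_getElem?_getD, List.getElem?_eq_getElem (by simpa using hi2)]
        have hdP : P.drop i1 = (P[i1]'hi1) :: P.drop (i1 + 1) := List.drop_eq_getElem_cons hi1
        have hdO : O.drop i2 = (O[i2]'hi2) :: O.drop (i2 + 1) := List.drop_eq_getElem_cons hi2
        rw [hp, ho]
        by_cases hcmp : (P[i1]'hi1).2 > (O[i2]'hi2).2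
        · rw [if_pos hcmp, hpf]
          have h' := ih (i1 + 1) i2 (ng ++ [(P[i1]'hi1).1]) (ns ++ [(P[i1]'hi1).2])
            (by omega) (by omega) (by omega)
          rw [show i1 + i2 + 1 = (i1 + 1) + i2 by omega, h']
          rw [hdP, hdO]
          simp only [pvMerge, if_pos hcmp, List.take_succ_cons, List.map_cons]
          simp
        · rw [if_neg hcmp, hof]
          have h' := ih i1 (i2 + 1) (ng ++ [(O[i2]'hi2).1]) (ns ++ [(O[i2]'hi2).2])
            (by omega) (by omega) (by omega)
          rw [show i1 + i2 + 1 = i1 + (i2 + 1) by omega, h']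
          rw [hdP, hdO]
          simp only [pvMerge, if_neg hcmp, List.take_succ_cons, List.map_cons]
          simp
      · -- offsprings exhausted: guard fails, tail-fill from population
        have hi2' : i2 = O.length := by omega
        rw [if_neg (by simp only [List.length_map]; omega)]
        simp only [List.length_map]
        rw [if_neg (by omega), if_pos (by omega)]
        have hOe : O.drop i2 = [] := by rw [hi2']; simp
        rw [hOe]
        have hii : ((P.length : Int) - (i2 : Int)) = (((P.length - i2 : Nat)) : Int) := by omega
        rw [hii, PySem.List.slice_natCast, PySem.List.slice_natCast]
        have hcnt : P.length - i2 - i1 = k + 1 := by omega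
        simp only [pvMerge, Prod.mk.injEq, hcnt]
        constructor
        · rw [← List.map_drop, ← List.map_take]
        · rw [← List.map_drop, ← List.map_take]

-- ===== VERDICT (by name: the statement is the Claim_ definition above) =====
theorem merge_replace_spec : Claim_equal_merge_replace := by
  unfold Claim_equal_merge_replace Spec_merge_replace
  intro population scores1 offsprings scores2 _ _
  unfold merge_replace merge_replace_alt
  set P := PySem.List.sorted (population.zip scores1) (fun x => x.2) true with hP
  set O := PySem.List.sorted (offsprings.zip scores2) (fun x => x.2) true with hO
  dsimp only
  have h := loopA_spec P O P.length 0 0 [] [] (by omega) (by omega) (by omega)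
  simp only [Nat.add_zero, List.drop_zero, List.nil_append] at h
  rcases hr : pvLoopA (P.map Prod.fst) (P.map Prod.snd) (O.map Prod.fst) (O.map Prod.snd)
      [] [] 0 0 0 with ⟨ng, ns, j1, j2⟩
  rw [hr] at h
  dsimp only at h
  dsimp only
  rw [h, sorted_append_eq_pvMerge, ← hP, ← hO]
  have hlen : (population.zip scores1).length = P.length :=
    (PySem.List.length_sorted _ _ _).symm
  rw [hlen]
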